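-- pv_equiv track=rewrite | github.com/alexandraback/datacollection | solutions_5634697451274240_1/Python/Nihilant/p2.py | pk
-- ===== SOURCE A (Python) =====
-- def pk(s):
--     index = s.find('+')
--     sol = 0 if index == 0 else 1
--     while index != -1 and index != len(s) - 1:
--         if s[index:index + 2] == '+-':
--             sol = sol + 2
--         index = s.find('+', index + 1)
--     return sol
-- ===== SOURCE B (Python) =====
-- def pk(s):
--     pairs = sum(1 for a, b in zip(s, s[1:]) if a == '+' and b == '-')
--     return (0 if s.startswith('+') else 1) + 2 * pairs
-- ===== Notes on version B (the rewrite author's own statement) =====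
-- stated objective: simpler
-- what changed: Replaced the find-driven index walk (repeated find calls mutating an index and an accumulator) by a closed-form expression: a base term from whether the string starts with a plus sign, plus twice the count of adjacent plus-minus character pairs taken from zipping the string with its tail.
import Mathlib
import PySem

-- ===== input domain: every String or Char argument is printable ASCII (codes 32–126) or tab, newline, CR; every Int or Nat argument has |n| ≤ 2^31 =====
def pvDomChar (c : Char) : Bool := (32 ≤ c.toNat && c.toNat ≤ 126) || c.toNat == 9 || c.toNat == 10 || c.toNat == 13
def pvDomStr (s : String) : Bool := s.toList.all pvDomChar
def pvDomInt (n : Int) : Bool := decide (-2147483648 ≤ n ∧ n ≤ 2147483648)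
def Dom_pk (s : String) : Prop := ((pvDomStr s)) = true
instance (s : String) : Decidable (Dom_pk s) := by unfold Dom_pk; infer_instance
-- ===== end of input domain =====

-- B replaces A's find-driven index walk by a closed form: a base from startswith('+') plus twice the count of adjacent '+','-' pairs (objective: simpler).

-- ===== PORT A =====
-- the while loop of A; fuel (length + 1) only makes the recursion total, it is never exhausted
def pkLoop (s : String) : Nat → Int → Int → Int
  | 0, _, sol => sol
  | fuel + 1, index, sol =>
    if index ≠ -1 ∧ index ≠ PySem.Str.len s - 1 then
      let sol' := if PySem.Str.slice s (some index) (some (index + 2)) == "+-" then sol + 2 else sol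
      pkLoop s fuel (PySem.Str.findFrom s "+" (index + 1)) sol'
    else sol

def pk (s : String) : Int :=
  let index := PySem.Str.find s "+"
  pkLoop s (s.toList.length + 1) index (if index == 0 then 0 else 1)

-- ===== PORT B =====
def pk_alt (s : String) : Int :=
  let pairs : Nat :=
    (List.zip s.toList (PySem.Str.slice s (some 1) none).toList).countP
      (fun p => p.1 == '+' && p.2 == '-')
  (if PySem.Str.startswith s "+" then 0 else 1) + 2 * (pairs : Int)

-- ===== PRECONDITION & SPEC =====
def Spec_pk (s : String) (out : Int) : Prop := out = pk_alt s
instance (s : String) (out : Int) : Decidable (Spec_pk s out) := by unfold Spec_pk; infer_instance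

-- ===== CLAIM (what is proved, stated in full; the proofs are below) =====
def Claim_equal_pk : Prop := ∀ (s : String), Dom_pk s → Spec_pk s (pk s)

-- ===== LEMMAS AND PROOFS =====

-- number of indices i with l[i] = '+' and l[i+1] = '-'
def pairCount : List Char → Nat
  | [] => 0
  | c :: l => (if c = '+' ∧ l.head? = some '-' then 1 else 0) + pairCount l

theorem pairCount_zip (l : List Char) :
    (List.zip l l.tail).countP (fun p => p.1 == '+' && p.2 == '-') = pairCount l := by
  induction l with
  | nil => rfl
  | cons c t ih =>
    cases t with
    | nil => simp [pairCount]
    | cons b t' =>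
      simp only [List.tail_cons, List.zip_cons_cons, List.countP_cons, pairCount,
        List.head?_cons] at *
      rw [← ih]
      by_cases hc : c = '+' <;> by_cases hb : b = '-' <;> simp [hc, hb] <;> omega

theorem pairCount_zero_of_no_plus (l : List Char) (h : '+' ∉ l) : pairCount l = 0 := by
  induction l with
  | nil => rfl
  | cons c t ih =>
    simp only [List.mem_cons, not_or] at h
    have : ¬ (c = '+' ∧ t.head? = some '-') := fun hh => h.1 hh.1.symm
    simp [pairCount, this, ih h.2]

theorem pairCount_short (l : List Char) (h : l.length ≤ 1) : pairCount l = 0 := by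
  match l, h with
  | [], _ => rfl
  | [c], _ => simp [pairCount]

theorem prefix_singleton_iff (c : Char) (l : List Char) :
    [c] <+: l ↔ l.head? = some c := by
  cases l with
  | nil => simp
  | cons a t => simp [List.cons_prefix_cons, eq_comm]

theorem pairCount_drop_congr (cs : List Char) (k j : Nat) (hkj : k ≤ j) (hj : j ≤ cs.length)
    (h : ∀ i, k ≤ i → i < j → ¬ ['+'] <+: cs.drop i) :
    pairCount (cs.drop k) = pairCount (cs.drop j) := by
  induction j with
  | zero =>
    have : k = 0 := by omega
    rw [this]
  | succ j ih =>
    rcases Nat.lt_or_ge k (j + 1) with hlt | hge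
    · have hk : k ≤ j := by omega
      have step : pairCount (cs.drop j) = pairCount (cs.drop (j + 1)) := by
        have hjlen : j < cs.length := by omega
        have hdrop : cs.drop j = cs[j] :: cs.drop (j + 1) := by
          rw [List.drop_eq_getElem_cons hjlen]
        have hne : cs[j] ≠ '+' := by
          intro hc
          exact h j hk (by omega) (by rw [hdrop, prefix_singleton_iff]; simp [hc])
        rw [hdrop]
        simp [pairCount, hne]
      rw [← step]
      exact ih hk (by omega) (fun i h1 h2 => h i h1 (by omega))
    · have : k = j + 1 := by omega
      rw [this]

-- loop invariant: starting from the first '+' at or after position k, the loop adds 2 per '+','-' pair in cs.drop k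
theorem pkLoop_eq (s : String) (fuel k : Nat) (hk : k ≤ s.toList.length)
    (hfuel : s.toList.length - k ≤ fuel) (sol : Int) :
    pkLoop s fuel (PySem.Chars.findFrom s.toList ['+'] (k : Int) none) sol
      = sol + 2 * (pairCount (s.toList.drop k) : Int) := by
  induction fuel generalizing k sol with
  | zero =>
    have hkl : k = s.toList.length := by omega
    subst hkl
    have hfind : PySem.Chars.findFrom s.toList ['+'] (s.toList.length : Int) none = -1 := by
      rw [PySem.Chars.findFrom_natCast_eq_neg_one_iff _ _ _ le_rfl, List.drop_length]
      simp
    rw [hfind, show pkLoop s 0 (-1) sol = sol from rfl, List.drop_length]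
    simp [pairCount]
  | succ fuel ih =>
    by_cases hneg : PySem.Chars.findFrom s.toList ['+'] (k : Int) none = -1
    · -- no further '+': loop exits immediately, and no pair remains
      have hnp : ¬ ['+'] <:+: s.toList.drop k :=
        (PySem.Chars.findFrom_natCast_eq_neg_one_iff _ _ _ hk).mp hneg
      have hmem : '+' ∉ s.toList.drop k := by
        intro hm
        obtain ⟨u, v, huv⟩ := List.append_of_mem hm
        exact hnp ⟨u, v, by simp [huv]⟩
      rw [hneg]
      simp [pkLoop, pairCount_zero_of_no_plus _ hmem]
    · obtain ⟨hle, hpre, hmin⟩ :=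
        PySem.Chars.findFrom_natCast_spec s.toList ['+'] k hk hneg
      set j : Int := PySem.Chars.findFrom s.toList ['+'] (k : Int) none with hj
      have hj0 : 0 ≤ j := le_trans (by exact_mod_cast Nat.zero_le k) hle
      have hhead : (s.toList.drop j.toNat).head? = some '+' :=
        (prefix_singleton_iff _ _).mp hpre
      have hjlen : j.toNat < s.toList.length := by
        by_contra hge
        rw [List.drop_eq_nil_of_le (by omega)] at hhead
        simp at hhead
      have hdropk : pairCount (s.toList.drop k) = pairCount (s.toList.drop j.toNat) := by
        refine pairCount_drop_congr s.toList k j.toNat (by omega) (by omega) ?_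
        intro i h1 h2
        exact hmin i h1 h2
      have hdropj : s.toList.drop j.toNat = '+' :: s.toList.drop (j.toNat + 1) := by
        rw [List.drop_eq_getElem_cons hjlen]
        rw [List.drop_eq_getElem_cons hjlen, List.head?_cons] at hhead
        simp at hhead
        simp [hhead]
      by_cases hlast : j = (s.toList.length : Int) - 1
      · -- the found '+' is the last character: the loop exits; no pair starts there
        have : pkLoop s (fuel + 1) j sol = sol := by
          simp [pkLoop, PySem.Str.len_eq, hlast]
        rw [this, hdropk]
        have : pairCount (s.toList.drop j.toNat) = 0 := by
          apply pairCount_short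
          simp only [List.length_drop]
          omega
        simp [this]
      · -- loop body runs: test the two-character slice, then continue from the next '+'
        have hjne : j ≠ -1 := by omega
        have hjlt : j.toNat + 1 ≤ s.toList.length := by omega
        have hslice : (PySem.Str.slice s (some j) (some (j + 2))).toList
            = (s.toList.drop j.toNat).take 2 := by
          rw [PySem.Str.toList_slice, PySem.Chars.slice_eq_listSlice]
          rw [show j = ((j.toNat : Nat) : Int) by omega,
            show ((j.toNat : Nat) : Int) + 2 = ((j.toNat : Nat) : Int) + ((2 : Nat) : Int) by norm_num,
            PySem.List.slice_natCast_add]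
          simp
          congr 2
          omega
        have hfrom : PySem.Str.findFrom s "+" (j + 1)
            = PySem.Chars.findFrom s.toList ['+'] ((j.toNat + 1 : Nat) : Int) none := by
          rw [PySem.Str.findFrom_eq]
          congr 1
          omega
        have hcond : (PySem.Str.slice s (some j) (some (j + 2)) == "+-")
            = decide ((s.toList.drop (j.toNat + 1)).head? = some '-') := by
          have : (PySem.Str.slice s (some j) (some (j + 2)) == "+-")
              = ((PySem.Str.slice s (some j) (some (j + 2))).toList == "+-".toList) := by
            rcases PySem.Str.slice s (some j) (some (j + 2)) with ⟨a⟩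
            simp [String.ext_iff]
          rw [this, hslice, hdropj]
          cases hrest : (s.toList.drop (j.toNat + 1)) with
          | nil => simp
          | cons b t =>
            by_cases hb : b = '-' <;> simp [hb, List.take]
        rw [hdropk, hdropj]
        have hbody : pkLoop s (fuel + 1) j sol
            = pkLoop s fuel (PySem.Chars.findFrom s.toList ['+'] ((j.toNat + 1 : Nat) : Int) none)
                (if (s.toList.drop (j.toNat + 1)).head? = some '-' then sol + 2 else sol) := by
          simp only [pkLoop, PySem.Str.len_eq]
          rw [if_pos ⟨hjne, by omega⟩, hfrom, hcond]
          by_cases hd : (s.toList.drop (j.toNat + 1)).head? = some '-' <;> simp [hd]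
        rw [hbody, ih (j.toNat + 1) hjlt (by omega)]
        simp only [pairCount]
        by_cases hd : (s.toList.drop (j.toNat + 1)).head? = some '-'
        · rw [if_pos hd, if_pos ⟨trivial, hd⟩]
          push_cast
          ring
        · rw [if_neg hd, if_neg (fun hh => hd hh.2)]
          push_cast
          ring

theorem find_zero_iff (cs : List Char) :
    (PySem.Chars.find cs ['+'] = 0) ↔ cs.head? = some '+' := by
  constructor
  · intro h
    have h0 : (0 : Int) ≤ PySem.Chars.find cs ['+'] := by omega
    have := (PySem.Chars.find_spec (s := cs) (sub := ['+']) h0).1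
    rw [h] at this
    simpa [prefix_singleton_iff] using this
  · intro h
    have hpre : ['+'] <+: cs := (prefix_singleton_iff _ _).mpr h
    have h0 : (0 : Int) ≤ PySem.Chars.find cs ['+'] := by
      rw [PySem.Chars.find_nonneg_iff]
      exact hpre.isInfix
    have hmin := (PySem.Chars.find_spec (s := cs) (sub := ['+']) h0).2
    by_contra hne
    have : (PySem.Chars.find cs ['+']).toNat > 0 := by omega
    exact hmin 0 this (by simpa using hpre)

-- ===== VERDICT (by name: the statement is the Claim_ definition above) =====
theorem pk_spec : Claim_equal_pk := by
  intro s _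
  unfold Spec_pk pk pk_alt
  have hfind : PySem.Str.find s "+" = PySem.Chars.findFrom s.toList ['+'] ((0 : Nat) : Int) none := by
    rw [PySem.Str.find_eq]
    simp [PySem.Chars.findFrom_zero]
  simp only
  rw [hfind, pkLoop_eq s (s.toList.length + 1) 0 (Nat.zero_le _) (by omega)]
  rw [← hfind]
  have hplus : ("+".toList) = ['+'] := by decide
  have hbase : (if PySem.Str.find s "+" == 0 then (0 : Int) else 1)
      = (if PySem.Str.startswith s "+" then (0 : Int) else 1) := by
    rw [PySem.Str.find_eq, PySem.Str.startswith_eq, hplus]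
    by_cases h : s.toList.head? = some '+'
    · have hf : PySem.Chars.find s.toList ['+'] = 0 := (find_zero_iff _).mpr h
      have hs : PySem.Chars.startswith s.toList ['+'] = true :=
        (PySem.Chars.startswith_iff _ _).mpr ((prefix_singleton_iff _ _).mpr h)
      simp [hf, hs]
    · have hf : PySem.Chars.find s.toList ['+'] ≠ 0 := fun hh => h ((find_zero_iff _).mp hh)
      have hs : ¬ PySem.Chars.startswith s.toList ['+'] = true := by
        rw [PySem.Chars.startswith_iff, prefix_singleton_iff]
        exact h
      simp [hf, hs]
  have hpairs : (List.zip s.toList (PySem.Str.slice s (some 1) none).toList).countP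
      (fun p => p.1 == '+' && p.2 == '-') = pairCount s.toList := by
    rw [← pairCount_zip]
    congr 1
    rw [PySem.Str.toList_slice, PySem.Chars.slice_eq_listSlice, PySem.List.slice_from_one]
  rw [List.drop_zero, hbase, hpairs]
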